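-- pv_equiv track=rewrite | github.com/jms7446/hackerrank | baekjoon/diamond/p1557.py | combination_prod_bound
-- ===== SOURCE A (Python) =====
-- def combination_prod_bound(xs, upper_bound):
--     def search(idx, acc, q):
--         if acc <= upper_bound:
--             res.append(q)
--         if acc > upper_bound or idx >= len(xs):
--             return
--         for i in range(idx, len(xs)):
--             search(i + 1, acc * xs[i], q + [xs[i]])
--
--     res = []
--     for i in range(len(xs)):
--         search(i + 1, xs[i], [xs[i]])
--     return res
-- ===== SOURCE B (Python) =====
-- def combination_prod_bound(xs, upper_bound):
--     # Iterative DFS with an explicit stack of frames (idx, acc, partial) instead of recursion.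
--     n = len(xs)
--     res = []
--     stack = [(i + 1, xs[i], [xs[i]]) for i in range(n - 1, -1, -1)]
--     while stack:
--         idx, acc, q = stack.pop()
--         if acc <= upper_bound:
--             res.append(q)
--             for i in range(n - 1, idx - 1, -1):
--                 stack.append((i + 1, acc * xs[i], q + [xs[i]]))
--     return res
-- ===== Notes on version B (the rewrite author's own statement) =====
-- stated objective: alternative
-- what changed: Replaces A's recursive DFS with inner for-loop and a mutated outer result list by an iterative worklist loop over an explicit stack of (idx, acc, partial) frames, popping frames and pushing extensions in reverse index order to reproduce the same preorder.
import Mathlib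
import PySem

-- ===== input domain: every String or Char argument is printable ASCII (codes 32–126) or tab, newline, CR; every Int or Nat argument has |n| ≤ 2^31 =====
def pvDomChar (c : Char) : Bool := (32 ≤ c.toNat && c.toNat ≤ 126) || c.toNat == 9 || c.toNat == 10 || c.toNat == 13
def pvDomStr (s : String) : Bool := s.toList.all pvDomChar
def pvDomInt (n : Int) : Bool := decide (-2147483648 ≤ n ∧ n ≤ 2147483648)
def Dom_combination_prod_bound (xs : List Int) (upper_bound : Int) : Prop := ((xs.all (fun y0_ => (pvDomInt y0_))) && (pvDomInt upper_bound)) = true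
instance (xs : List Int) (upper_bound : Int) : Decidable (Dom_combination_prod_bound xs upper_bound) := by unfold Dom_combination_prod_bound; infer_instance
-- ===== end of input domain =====

-- B replaces A's recursive DFS (inner `search` mutating `res`) by an iterative loop over an
-- explicit stack of (idx, acc, partial) frames producing the same preorder; objective: alternative.

-- ===== PORT A =====
-- A's inner `search(idx, acc, q)`: `res` is threaded as an explicit accumulator; the
-- `for i in range(idx, len(xs))` loop is a foldl over `range' idx (len - idx)` (attached
-- for the termination proof); branches in A's order.
def searchA (xs : List Int) (ub : Int) (idx : Nat) (acc : Int) (q : List Int)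
    (res : List (List Int)) : List (List Int) :=
  let res1 := if acc ≤ ub then res ++ [q] else res
  if acc > ub ∨ xs.length ≤ idx then res1
  else (List.range' idx (xs.length - idx)).attach.foldl
    (fun r i => searchA xs ub (i.1 + 1) (acc * xs[i.1]!) (q ++ [xs[i.1]!]) r) res1
termination_by xs.length - idx
decreasing_by
  have := (List.mem_range'_1).mp i.2; omega

def combination_prod_bound (xs : List Int) (upper_bound : Int) : List (List Int) :=
  (List.range xs.length).foldl
    (fun res i => searchA xs upper_bound (i + 1) xs[i]! [xs[i]!] res) []

-- ===== PORT B =====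
-- Termination measure helper for the worklist loop: a frame with index idx weighs
-- 2^(n+1-idx); the extension frames it pushes weigh strictly less in total.
theorem pushWeightChain (idx k : Nat) :
    ((List.range' idx k).map (fun i => 2 ^ (idx + k - i))).sum = 2 ^ (k + 1) - 2 := by
  induction k generalizing idx with
  | zero => simp
  | succ k ih =>
    rw [List.range'_succ]
    simp only [List.map_cons, List.sum_cons]
    have h1 : idx + (k + 1) - idx = k + 1 := by omega
    have h2 : ((List.range' (idx + 1) k).map (fun i => 2 ^ (idx + (k + 1) - i))).sum
        = ((List.range' (idx + 1) k).map (fun i => 2 ^ (idx + 1 + k - i))).sum := by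
      congr 1
      apply List.map_congr_left
      intro i hi
      have := (List.mem_range'_1).mp hi
      congr 1
      omega
    rw [h1, h2, ih (idx + 1)]
    have h3 : (1:ℕ) ≤ 2 ^ k := Nat.one_le_two_pow
    have h4 : 2 ^ (k + 1) = 2 * 2 ^ k := by rw [Nat.pow_succ]; ring
    have h5 : 2 ^ (k + 2) = 4 * 2 ^ k := by rw [Nat.pow_succ, Nat.pow_succ]; ring
    omega

theorem pushWeightLt (n idx : Nat) :
    ((List.range' idx (n - idx)).map (fun i => 2 ^ (n + 1 - (i + 1)))).sum
      < 2 ^ (n + 1 - idx) := by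
  by_cases h : idx ≤ n
  · have hk : ((List.range' idx (n - idx)).map (fun i => 2 ^ (n + 1 - (i + 1)))).sum
        = ((List.range' idx (n - idx)).map (fun i => 2 ^ (idx + (n - idx) - i))).sum := by
      congr 1
      apply List.map_congr_left
      intro i hi
      have := (List.mem_range'_1).mp hi
      congr 1
      omega
    rw [hk, pushWeightChain]
    have h1 : (1:ℕ) ≤ 2 ^ (n - idx) := Nat.one_le_two_pow
    have h2 : n + 1 - idx = (n - idx) + 1 := by omega
    rw [h2]
    have h3 : 2 ^ ((n - idx) + 1) = 2 * 2 ^ (n - idx) := by rw [Nat.pow_succ]; ring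
    omega
  · have hz : n - idx = 0 := by omega
    rw [hz]
    simp

-- B's while loop: pop the top frame (head of the list); if acc ≤ ub, record q and push the
-- extension frames; Python pushes them in reverse index order onto the array end, which is
-- the same stack as prepending the in-order list here.
def loopB (xs : List Int) (ub : Int) :
    List (Nat × Int × List Int) → List (List Int) → List (List Int)
  | [], res => res
  | (idx, acc, q) :: st, res =>
    if acc ≤ ub then
      loopB xs ub
        (((List.range' idx (xs.length - idx)).map
            (fun i => (i + 1, acc * xs[i]!, q ++ [xs[i]!]))) ++ st)
        (res ++ [q])
    else loopB xs ub st res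
termination_by st => (st.map (fun f => 2 ^ (xs.length + 1 - f.1))).sum
decreasing_by
  · simp only [List.map_append, List.sum_append, List.map_map, Function.comp_def,
      List.map_cons, List.sum_cons]
    have := pushWeightLt xs.length idx
    omega
  · simp only [List.map_cons, List.sum_cons]
    have := Nat.two_pow_pos (xs.length + 1 - idx)
    omega

def combination_prod_bound_alt (xs : List Int) (upper_bound : Int) : List (List Int) :=
  loopB xs upper_bound
    ((List.range xs.length).map (fun i => (i + 1, xs[i]!, [xs[i]!]))) []

-- ===== PRECONDITION & SPEC =====
def Spec_combination_prod_bound (xs : List Int) (upper_bound : Int) (out : List (List Int)) : Prop := out = combination_prod_bound_alt xs upper_bound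
instance (xs : List Int) (upper_bound : Int) (out : List (List Int)) : Decidable (Spec_combination_prod_bound xs upper_bound out) := by unfold Spec_combination_prod_bound; infer_instance

-- ===== CLAIM (what is proved, stated in full; the proofs are below) =====
def Claim_equal_combination_prod_bound : Prop := ∀ (xs : List Int) (upper_bound : Int), Dom_combination_prod_bound xs upper_bound → Spec_combination_prod_bound xs upper_bound (combination_prod_bound xs upper_bound)

-- ===== LEMMAS AND PROOFS =====

-- The mathematical DFS subtree output of a frame (idx, acc, q): q itself (if acc ≤ ub)
-- followed by the outputs of its extension frames, in order.
def subT (xs : List Int) (ub : Int) (idx : Nat) (acc : Int) (q : List Int) :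
    List (List Int) :=
  if acc ≤ ub then
    q :: ((List.range' idx (xs.length - idx)).attach.map
      (fun i => subT xs ub (i.1 + 1) (acc * xs[i.1]!) (q ++ [xs[i.1]!]))).flatten
  else []
termination_by xs.length - idx
decreasing_by
  have := (List.mem_range'_1).mp i.2; omega

theorem subT_unfold (xs : List Int) (ub : Int) (idx : Nat) (acc : Int) (q : List Int) :
    subT xs ub idx acc q =
      if acc ≤ ub then
        q :: ((List.range' idx (xs.length - idx)).map
          (fun i => subT xs ub (i + 1) (acc * xs[i]!) (q ++ [xs[i]!]))).flatten
      else [] := by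
  rw [subT]
  congr 1
  simp

-- A's search appends exactly the subtree output of its frame to res.
theorem searchA_eq_subT (xs : List Int) (ub : Int) :
    ∀ (k idx : Nat) (acc : Int) (q : List Int) (res : List (List Int)),
      xs.length - idx ≤ k →
      searchA xs ub idx acc q res = res ++ subT xs ub idx acc q := by
  intro k
  induction k with
  | zero =>
    intro idx acc q res hk
    rw [searchA, subT_unfold]
    have hge : xs.length ≤ idx := by omega
    have hr : xs.length - idx = 0 := by omega
    rw [hr]
    by_cases hA : acc ≤ ub
    · simp [hA, hge, not_lt.mpr hA]
    · simp [hA, lt_of_not_ge hA]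
  | succ k ih =>
    intro idx acc q res hk
    rw [searchA, subT_unfold]
    by_cases hA : acc ≤ ub
    · by_cases hge : xs.length ≤ idx
      · have hr : xs.length - idx = 0 := by omega
        simp [hA, hge, not_lt.mpr hA, hr]
      · have hcond : ¬(acc > ub ∨ xs.length ≤ idx) := not_or.mpr ⟨not_lt.mpr hA, hge⟩
        simp only [if_pos hA, if_neg hcond]
        have hf : (List.range' idx (xs.length - idx)).attach.foldl
            (fun r i => searchA xs ub (i.1 + 1) (acc * xs[i.1]!) (q ++ [xs[i.1]!]) r)
            (res ++ [q])
            = (List.range' idx (xs.length - idx)).attach.foldl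
            (fun r i => r ++ subT xs ub (i.1 + 1) (acc * xs[i.1]!) (q ++ [xs[i.1]!]))
            (res ++ [q]) := by
          apply PySem.List.foldl_congr_mem
          intro r i hi
          apply ih
          have := (List.mem_range'_1).mp i.2
          omega
        rw [hf, PySem.List.foldl_append_eq_flatMap]
        simp [List.flatMap_def, List.append_assoc]
    · simp [hA, lt_of_not_ge hA]

-- B's worklist loop appends the concatenated subtree outputs of the stacked frames to res.
theorem loopB_eq_subT (xs : List Int) (ub : Int) :
    ∀ (st : List (Nat × Int × List Int)) (res : List (List Int)),
      loopB xs ub st res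
        = res ++ (st.map (fun f => subT xs ub f.1 f.2.1 f.2.2)).flatten := by
  intro st res
  fun_induction loopB xs ub st res with
  | case1 res => simp
  | case2 idx acc q st res hA ih =>
    rw [ih]
    simp only [List.map_cons, List.flatten_cons, List.map_append, List.flatten_append,
      List.map_map, Function.comp_def]
    rw [subT_unfold xs ub idx acc q]
    simp [hA, List.append_assoc]
  | case3 idx acc q st res hA ih =>
    rw [ih]
    simp only [List.map_cons, List.flatten_cons]
    rw [subT_unfold xs ub idx acc q]
    simp [hA]

-- ===== VERDICT (by name: the statement is the Claim_ definition above) =====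
theorem combination_prod_bound_spec : Claim_equal_combination_prod_bound := by
  intro xs ub _
  show combination_prod_bound xs ub = combination_prod_bound_alt xs ub
  unfold combination_prod_bound combination_prod_bound_alt
  rw [loopB_eq_subT]
  have h : (List.range xs.length).foldl
      (fun res i => searchA xs ub (i + 1) xs[i]! [xs[i]!] res) []
      = (List.range xs.length).foldl
      (fun res i => res ++ subT xs ub (i + 1) xs[i]! [xs[i]!]) [] := by
    apply PySem.List.foldl_congr_mem
    intro r i hi
    exact searchA_eq_subT xs ub xs.length (i + 1) xs[i]! [xs[i]!] r (by omega)
  rw [h, PySem.List.foldl_append_eq_flatMap]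
  simp [List.flatMap_def, List.map_map, Function.comp_def]
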